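-- pv_equiv track=rewrite | github.com/Manuk38/AGENTIC-AI | agentic-misra-do178c/tools/lint_misra_light.py | _has_nested_comments
-- ===== SOURCE A (Python) =====
-- def _has_nested_comments(code: str) -> bool:
--     i = 0
--     n = len(code)
--     while i < n:
--         if i + 1 < n and code[i] == '/' and code[i + 1] == '*':
--             i += 2  # enter comment
--             while i < n:
--                 if i + 1 < n and code[i] == '/' and code[i + 1] == '*':
--                     return True  # nested start before closing
--                 if i + 1 < n and code[i] == '*' and code[i + 1] == '/':
--                     i += 2  # close comment
--                     break
--                 i += 1
--             continue
--         i += 1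
--     return False
-- ===== SOURCE B (Python) =====
-- def _has_nested_comments(code: str) -> bool:
--     # Mealy-style finite automaton over single characters, no indices/lookahead:
--     # OUT        outside any comment
--     # OUT_SLASH  outside, previous char was '/'
--     # IN         inside a comment
--     # IN_SLASH   inside, previous char was '/'  (a following '*' means a nested start)
--     # IN_STAR    inside, previous char was '*'  (a following '/' closes the comment)
--     OUT, OUT_SLASH, IN, IN_SLASH, IN_STAR = range(5)
--     state = OUT
--     for c in code:
--         if state == OUT:
--             state = OUT_SLASH if c == '/' else OUT
--         elif state == OUT_SLASH:
--             state = IN if c == '*' else (OUT_SLASH if c == '/' else OUT)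
--         elif state == IN:
--             state = IN_SLASH if c == '/' else (IN_STAR if c == '*' else IN)
--         elif state == IN_SLASH:
--             if c == '*':
--                 return True
--             state = IN_SLASH if c == '/' else IN
--         else:  # IN_STAR
--             state = OUT if c == '/' else (IN_STAR if c == '*' else IN)
--     return False
-- ===== Notes on version B (the rewrite author's own statement) =====
-- stated objective: alternative
-- what changed: Replaces A's two nested index-driven while loops with two-character lookahead and index jumps by a single fold over the characters driving an explicit 5-state finite automaton (outside / outside-after-slash / inside / inside-after-slash / inside-after-star), with no indices or lookahead at all.
import Mathlib
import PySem

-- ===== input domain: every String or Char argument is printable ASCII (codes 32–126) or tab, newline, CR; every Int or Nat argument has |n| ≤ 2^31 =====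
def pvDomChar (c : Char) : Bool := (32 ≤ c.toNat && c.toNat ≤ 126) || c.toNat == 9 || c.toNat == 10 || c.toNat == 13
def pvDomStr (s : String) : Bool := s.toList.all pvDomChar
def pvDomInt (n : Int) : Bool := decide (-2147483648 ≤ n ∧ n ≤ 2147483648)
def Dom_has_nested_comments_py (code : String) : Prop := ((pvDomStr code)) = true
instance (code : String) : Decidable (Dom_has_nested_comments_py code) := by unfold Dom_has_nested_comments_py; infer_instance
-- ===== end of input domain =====

-- B replaces A's nested index-driven while loops (two-char lookahead, index jumps) by a
-- single fold over the characters driving an explicit 5-state finite automaton (alternative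
-- decomposition, same return value on every string).

-- ===== PORT A =====
-- inner while loop of A: scanning inside a comment from index i;
-- 'none' = nested '/*' found (A returns True), 'some i' = loop left with index i
def innerA (l : List Char) (i : Nat) : Option Nat :=
  if _h : i < l.length then
    if i + 1 < l.length ∧ l[i]? = some '/' ∧ l[i + 1]? = some '*' then none
    else if i + 1 < l.length ∧ l[i]? = some '*' ∧ l[i + 1]? = some '/' then some (i + 2)
    else innerA l (i + 1)
  else some i
termination_by l.length - i

-- needed by outerA's termination: the inner loop only moves the index forward
theorem innerA_ge (l : List Char) (k j : Nat) (h : innerA l k = some j) : k ≤ j := by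
  fun_induction innerA l k with
  | case1 k hk h1 => exact absurd h (by simp)
  | case2 k hk h1 h2 => injection h with h; omega
  | case3 k hk h1 h2 ih => have := ih h; omega
  | case4 k hk => injection h with h; omega

-- outer while loop of A
def outerA (l : List Char) (i : Nat) : Bool :=
  if _h : i < l.length then
    if _h2 : i + 1 < l.length ∧ l[i]? = some '/' ∧ l[i + 1]? = some '*' then
      match hm : innerA l (i + 2) with
      | none => true
      | some j => outerA l j
    else outerA l (i + 1)
  else false
termination_by l.length - i
decreasing_by
  · have := innerA_ge l (i + 2) j hm; omega
  · omega

def has_nested_comments_py (code : String) : Bool := outerA code.toList 0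

-- ===== PORT B =====
-- the five automaton states of Source B (OUT, OUT_SLASH, IN, IN_SLASH, IN_STAR)
inductive BState : Type
  | out | outSlash | inC | inSlash | inStar
deriving DecidableEq, Repr

-- Source B's 'for c in code' loop: fold over the characters, threading the state;
-- the early 'return True' of the IN_SLASH branch is the 'true' result
def runB (l : List Char) (s : BState) : Bool :=
  match l with
  | [] => false
  | c :: t =>
    match s with
    | .out => runB t (if c = '/' then .outSlash else .out)
    | .outSlash => runB t (if c = '*' then .inC else if c = '/' then .outSlash else .out)
    | .inC => runB t (if c = '/' then .inSlash else if c = '*' then .inStar else .inC)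
    | .inSlash => if c = '*' then true else runB t (if c = '/' then .inSlash else .inC)
    | .inStar => runB t (if c = '/' then .out else if c = '*' then .inStar else .inC)

def has_nested_comments_py_alt (code : String) : Bool := runB code.toList .out

-- ===== PRECONDITION & SPEC =====
def Spec_has_nested_comments_py (code : String) (out : Bool) : Prop := out = has_nested_comments_py_alt code
instance (code : String) (out : Bool) : Decidable (Spec_has_nested_comments_py code out) := by unfold Spec_has_nested_comments_py; infer_instance

-- ===== CLAIM (what is proved, stated in full; the proofs are below) =====
def Claim_equal_has_nested_comments_py : Prop := ∀ (code : String), Dom_has_nested_comments_py code → Spec_has_nested_comments_py code (has_nested_comments_py code)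

-- ===== LEMMAS AND PROOFS =====

-- first char of l.drop i is l[i]
theorem drop_head_eq (l : List Char) (i : Nat) (c : Char) (t : List Char)
    (hd : l.drop i = c :: t) : l[i]? = some c := by
  have h0 : (l.drop i)[0]? = some c := by rw [hd]; rfl
  rw [List.getElem?_drop] at h0
  simpa using h0

-- after one step, outSlash and out transition identically unless the next char is '*'
theorem slash_out (l : List Char) (i : Nat) (h : l[i]? ≠ some '*') :
    runB (l.drop i) .outSlash = runB (l.drop i) .out := by
  cases hd : l.drop i with
  | nil => rfl
  | cons c t =>
    have hc : ¬ c = '*' := fun he => h (he ▸ drop_head_eq l i c t hd)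
    simp [runB, hc]

-- inSlash and inC transition identically unless the next char is '*'
theorem inSlash_inC (l : List Char) (i : Nat) (h : l[i]? ≠ some '*') :
    runB (l.drop i) .inSlash = runB (l.drop i) .inC := by
  cases hd : l.drop i with
  | nil => rfl
  | cons c t =>
    have hc : ¬ c = '*' := fun he => h (he ▸ drop_head_eq l i c t hd)
    simp [runB, hc]

-- inStar and inC transition identically unless the next char is '/'
theorem inStar_inC (l : List Char) (i : Nat) (h : l[i]? ≠ some '/') :
    runB (l.drop i) .inStar = runB (l.drop i) .inC := by
  cases hd : l.drop i with
  | nil => rfl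
  | cons c t =>
    have hc : ¬ c = '/' := fun he => h (he ▸ drop_head_eq l i c t hd)
    simp [runB, hc]

-- if the token at i is not X (and l[i] is its first char), the next char is not X's second char
theorem no_token_snd (l : List Char) (i : Nat) (a b : Char) (hi : i < l.length)
    (h2 : ¬(i + 1 < l.length ∧ l[i]? = some a ∧ l[i + 1]? = some b))
    (hc : l[i] = a) : l[i + 1]? ≠ some b := by
  intro hb
  have hlt : i + 1 < l.length := by
    by_contra hn
    rw [List.getElem?_eq_none (by omega)] at hb
    exact absurd hb (by simp)
  exact h2 ⟨hlt, by rw [List.getElem?_eq_getElem hi, hc], hb⟩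

-- A's inner loop ≙ the automaton run from state IN
theorem inner_eq (l : List Char) (i : Nat) :
    (match innerA l i with
      | none => true
      | some j => runB (l.drop j) .out) = runB (l.drop i) .inC := by
  by_cases hi : i < l.length
  · by_cases h1 : i + 1 < l.length ∧ l[i]? = some '/' ∧ l[i + 1]? = some '*'
    · have hA : innerA l i = none := by rw [innerA, dif_pos hi, if_pos h1]
      obtain ⟨hlt, ha, hb⟩ := h1
      have ha' : l[i] = '/' := by rw [List.getElem?_eq_getElem hi] at ha; injection ha
      have hb' : l[i + 1] = '*' := by rw [List.getElem?_eq_getElem hlt] at hb; injection hb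
      rw [hA, List.drop_eq_getElem_cons hi, List.drop_eq_getElem_cons hlt, ha', hb']
      simp [runB]
    · by_cases h2 : i + 1 < l.length ∧ l[i]? = some '*' ∧ l[i + 1]? = some '/'
      · have hA : innerA l i = some (i + 2) := by
          rw [innerA, dif_pos hi, if_neg h1, if_pos h2]
        obtain ⟨hlt, ha, hb⟩ := h2
        have ha' : l[i] = '*' := by rw [List.getElem?_eq_getElem hi] at ha; injection ha
        have hb' : l[i + 1] = '/' := by rw [List.getElem?_eq_getElem hlt] at hb; injection hb
        rw [hA, List.drop_eq_getElem_cons hi, List.drop_eq_getElem_cons hlt, ha', hb']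
        simp [runB]
      · have hA : innerA l i = innerA l (i + 1) := by
          rw [innerA, dif_pos hi, if_neg h1, if_neg h2]
        rw [hA, inner_eq l (i + 1), List.drop_eq_getElem_cons hi]
        by_cases hc : l[i] = '/'
        · have hb := no_token_snd l i '/' '*' hi h1 hc
          simp only [runB, hc]
          exact (inSlash_inC l (i + 1) hb).symm
        · by_cases hs : l[i] = '*'
          · have hb := no_token_snd l i '*' '/' hi h2 hs
            simp [runB, hs, inStar_inC l (i + 1) hb]
          · simp [runB, hc, hs]
  · have hA : innerA l i = some i := by rw [innerA, dif_neg hi]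
    have hnil : l.drop i = [] := by rw [List.drop_eq_nil_iff]; omega
    simp [hA, hnil, runB]
termination_by l.length - i

-- A's outer loop ≙ the automaton run from state OUT
theorem outer_eq (l : List Char) (i : Nat) : outerA l i = runB (l.drop i) .out := by
  by_cases hi : i < l.length
  · by_cases h2 : i + 1 < l.length ∧ l[i]? = some '/' ∧ l[i + 1]? = some '*'
    · have hA : outerA l i =
          (match innerA l (i + 2) with
            | none => true
            | some j => outerA l j) := by
        rw [outerA, dif_pos hi, dif_pos h2]
        cases innerA l (i + 2) <;> rfl
      obtain ⟨hlt, ha, hb⟩ := h2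
      have ha' : l[i] = '/' := by rw [List.getElem?_eq_getElem hi] at ha; injection ha
      have hb' : l[i + 1] = '*' := by rw [List.getElem?_eq_getElem hlt] at hb; injection hb
      rw [hA, List.drop_eq_getElem_cons hi, List.drop_eq_getElem_cons hlt, ha', hb']
      have hR : runB ('/' :: '*' :: l.drop (i + 2)) .out = runB (l.drop (i + 2)) .inC := by
        simp [runB]
      rw [hR, ← inner_eq l (i + 2)]
      cases hm : innerA l (i + 2) with
      | none => rfl
      | some j =>
        simp only []
        exact outer_eq l j
    · have hstep : outerA l i = outerA l (i + 1) := by rw [outerA, dif_pos hi, dif_neg h2]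
      rw [hstep, outer_eq l (i + 1), List.drop_eq_getElem_cons hi]
      by_cases hc : l[i] = '/'
      · have hb := no_token_snd l i '/' '*' hi h2 hc
        simp only [runB, hc]
        exact (slash_out l (i + 1) hb).symm
      · simp [runB, hc]
  · have hnil : l.drop i = [] := by rw [List.drop_eq_nil_iff]; omega
    rw [hnil, outerA, dif_neg hi]
    rfl
termination_by l.length - i
decreasing_by
  · have := innerA_ge l (i + 2) j hm; omega
  · omega

-- ===== VERDICT (by name: the statement is the Claim_ definition above) =====
theorem has_nested_comments_py_spec : Claim_equal_has_nested_comments_py := by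
  intro code _
  unfold Spec_has_nested_comments_py has_nested_comments_py has_nested_comments_py_alt
  simpa using outer_eq code.toList 0
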